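-- pv_equiv track=rewrite | github.com/brianmcentire/sift | sift/commands/comm.py | _compare_filenames
-- ===== SOURCE A (Python) =====
-- def _build_rel_map(entries: list[dict], base_path: str) -> dict[str, dict]:
--     """Build relative_path → entry map. Includes both files and dir entries."""
--     result = {}
--     base = base_path.rstrip("/")
--     base_lower = base.lower()
--
--     for entry in entries:
--         entry_type = entry.get("entry_type", "file")
--         full_path = entry.get("path") or ""
--
--         if entry_type == "dir" and not full_path:
--             # Depth-1 dir entries from /files/ls: use segment as the relative key
--             seg = entry.get("segment", "")
--             if seg:
--                 result[seg + "/"] = entry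
--             continue
--
--         full_path = full_path.rstrip("/")
--         if not full_path:
--             continue
--
--         if full_path.lower().startswith(base_lower + "/"):
--             rel = full_path[len(base) + 1:]
--         elif full_path.lower() == base_lower:
--             continue
--         else:
--             rel = full_path
--
--         result[rel] = entry
--
--     return result
--
-- def _compare_filenames(
--     entries1: list[dict],
--     entries2: list[dict],
--     path1: str,
--     path2: str,
--     suppress_1: bool,
--     suppress_2: bool,
--     suppress_3: bool,
-- ) -> list[str]:
--     map1 = _build_rel_map(entries1, path1)
--     map2 = _build_rel_map(entries2, path2)
--     all_keys = sorted(set(map1.keys()) | set(map2.keys()))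
--
--     lines = []
--     for rel in all_keys:
--         in1 = rel in map1
--         in2 = rel in map2
--
--         if in1 and not in2:
--             if not suppress_1:
--                 lines.append(rel)
--         elif in2 and not in1:
--             if not suppress_2:
--                 lines.append(f"\t{rel}")
--         else:
--             if not suppress_3:
--                 # Dirs in common: no hash comparison possible
--                 if map1[rel].get("entry_type") == "dir":
--                     lines.append(f"\t\t{rel}")
--                     continue
--                 h1 = map1[rel].get("hash")
--                 h2 = map2[rel].get("hash")
--                 if h1 is None and h2 is None:
--                     lines.append(f"\t\t{rel} [no-hash]")
--                 elif h1 != h2: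
--                     lines.append(f"\t\t{rel} [differs]")
--                 else:
--                     lines.append(f"\t\t{rel}")
--
--     return lines
-- ===== SOURCE B (Python) =====
-- def _build_rel_map(entries: list[dict], base_path: str) -> dict[str, dict]:
--     """Build relative_path → entry map. Includes both files and dir entries."""
--     result = {}
--     base = base_path.rstrip("/")
--     base_lower = base.lower()
--
--     for entry in entries:
--         entry_type = entry.get("entry_type", "file")
--         full_path = entry.get("path") or ""
--
--         if entry_type == "dir" and not full_path:
--             seg = entry.get("segment", "")
--             if seg:
--                 result[seg + "/"] = entry
--             continue
--
--         full_path = full_path.rstrip("/")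
--         if not full_path:
--             continue
--
--         if full_path.lower().startswith(base_lower + "/"):
--             rel = full_path[len(base) + 1:]
--         elif full_path.lower() == base_lower:
--             continue
--         else:
--             rel = full_path
--
--         result[rel] = entry
--
--     return result
--
--
-- def _common_line(e1: dict, e2: dict, rel: str) -> str:
--     """Line for a key present on both sides."""
--     if e1.get("entry_type") == "dir":
--         return f"\t\t{rel}"
--     h1 = e1.get("hash")
--     h2 = e2.get("hash")
--     if h1 is None and h2 is None:
--         return f"\t\t{rel} [no-hash]"
--     if h1 != h2:
--         return f"\t\t{rel} [differs]"
--     return f"\t\t{rel}"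
--
--
-- def _compare_filenames(
--     entries1: list[dict],
--     entries2: list[dict],
--     path1: str,
--     path2: str,
--     suppress_1: bool,
--     suppress_2: bool,
--     suppress_3: bool,
-- ) -> list[str]:
--     map1 = _build_rel_map(entries1, path1)
--     map2 = _build_rel_map(entries2, path2)
--     keys1 = sorted(map1)
--     keys2 = sorted(map2)
--
--     # Two-pointer merge of the two sorted key lists: each step classifies the
--     # smaller head without any membership test, emitting output already in order.
--     lines = []
--     i, j, n1, n2 = 0, 0, len(keys1), len(keys2)
--     while i < n1 or j < n2:
--         if j >= n2 or (i < n1 and keys1[i] < keys2[j]):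
--             if not suppress_1:
--                 lines.append(keys1[i])
--             i += 1
--         elif i >= n1 or keys2[j] < keys1[i]:
--             if not suppress_2:
--                 lines.append(f"\t{keys2[j]}")
--             j += 1
--         else:
--             rel = keys1[i]
--             if not suppress_3:
--                 lines.append(_common_line(map1[rel], map2[rel], rel))
--             i += 1
--             j += 1
--     return lines
-- ===== Notes on version B (the rewrite author's own statement) =====
-- stated objective: alternative
-- what changed: Replaces A's sort-of-the-key-union followed by a loop with per-key dict-membership tests by a two-pointer merge of the two independently sorted key lists: each step compares the two heads and emits the left-only / right-only / common line directly, so no union set, no membership tests and no post-classification pass exist in B.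
import Mathlib
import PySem

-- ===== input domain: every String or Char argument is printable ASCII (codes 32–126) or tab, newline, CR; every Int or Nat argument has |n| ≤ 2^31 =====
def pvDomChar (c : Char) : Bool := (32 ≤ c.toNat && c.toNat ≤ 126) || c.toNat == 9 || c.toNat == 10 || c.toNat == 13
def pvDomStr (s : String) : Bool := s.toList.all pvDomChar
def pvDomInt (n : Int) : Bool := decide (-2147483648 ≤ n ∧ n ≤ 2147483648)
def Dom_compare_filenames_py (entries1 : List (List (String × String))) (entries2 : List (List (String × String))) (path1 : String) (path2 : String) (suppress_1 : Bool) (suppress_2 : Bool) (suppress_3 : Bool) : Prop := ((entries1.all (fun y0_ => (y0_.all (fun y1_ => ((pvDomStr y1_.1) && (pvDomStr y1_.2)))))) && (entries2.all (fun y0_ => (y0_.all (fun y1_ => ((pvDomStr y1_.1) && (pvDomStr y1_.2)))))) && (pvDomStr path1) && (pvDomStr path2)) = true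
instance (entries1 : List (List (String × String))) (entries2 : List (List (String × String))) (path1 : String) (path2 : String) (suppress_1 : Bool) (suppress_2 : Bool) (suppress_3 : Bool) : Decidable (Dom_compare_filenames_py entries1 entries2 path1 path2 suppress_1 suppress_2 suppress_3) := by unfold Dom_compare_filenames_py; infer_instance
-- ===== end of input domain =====

-- B replaces A's sorted-union loop with membership tests by a two-pointer merge of the two sorted key lists (alternative algorithm, same cost).

-- ===== PORT A =====
-- Python + on str (exact on code points; Lean's String.append is kernel-opaque)
def pvCat (a b : String) : String := String.ofList (a.toList ++ b.toList)

-- s.rstrip("/") ported by hand: drop trailing '/' characters (exact)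
def pvRstripSlash (s : String) : String := String.ofList ((s.toList.reverse.dropWhile (fun c => c == '/')).reverse)

-- _build_rel_map, shared verbatim by both Pythons
def pvBuildRelMap (entries : List (List (String × String))) (base_path : String) : PySem.Dict String (List (String × String)) :=
  let base := pvRstripSlash base_path
  let base_lower := PySem.Str.lower base
  entries.foldl (fun result entry =>
    let entry_type := (PySem.Dict.mk entry).getD "entry_type" "file"
    let full_path := ((PySem.Dict.mk entry).get? "path").getD ""   -- entry.get("path") or "" (falsy "" stays "")
    if entry_type == "dir" && full_path == "" then
      let seg := (PySem.Dict.mk entry).getD "segment" ""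
      if seg != "" then result.insert (pvCat seg "/") entry else result
    else
      let fp := pvRstripSlash full_path
      if fp == "" then result
      else if PySem.Str.startswith (PySem.Str.lower fp) (pvCat base_lower "/") then
        result.insert (String.ofList (fp.toList.drop (base.toList.length + 1))) entry   -- full_path[len(base)+1:]
      else if PySem.Str.lower fp == base_lower then result
      else result.insert fp entry) PySem.Dict.empty

def compare_filenames_py (entries1 : List (List (String × String))) (entries2 : List (List (String × String))) (path1 : String) (path2 : String) (suppress_1 : Bool) (suppress_2 : Bool) (suppress_3 : Bool) : List String :=
  let map1 := pvBuildRelMap entries1 path1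
  let map2 := pvBuildRelMap entries2 path2
  let all_keys := PySem.List.sorted (PySem.Set.union (PySem.Set.ofList map1.keys) map2.keys) (fun x => x) false
  all_keys.foldl (fun lines rel =>
    let in1 := map1.contains rel
    let in2 := map2.contains rel
    if in1 && !in2 then
      if !suppress_1 then lines ++ [rel] else lines
    else if in2 && !in1 then
      if !suppress_2 then lines ++ [pvCat "\t" rel] else lines
    else
      if !suppress_3 then
        let e1 := (map1.get? rel).getD []
        if (PySem.Dict.mk e1).get? "entry_type" == some "dir" then lines ++ [pvCat "\t\t" rel]
        else
          let e2 := (map2.get? rel).getD []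
          let h1 := (PySem.Dict.mk e1).get? "hash"
          let h2 := (PySem.Dict.mk e2).get? "hash"
          if h1 == none && h2 == none then lines ++ [pvCat (pvCat "\t\t" rel) " [no-hash]"]
          else if h1 != h2 then lines ++ [pvCat (pvCat "\t\t" rel) " [differs]"]
          else lines ++ [pvCat "\t\t" rel]
      else lines) []

-- ===== PORT B =====
-- _common_line from Source B
def pvCommonLine (e1 e2 : List (String × String)) (rel : String) : String :=
  if (PySem.Dict.mk e1).get? "entry_type" == some "dir" then pvCat "\t\t" rel
  else
    let h1 := (PySem.Dict.mk e1).get? "hash"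
    let h2 := (PySem.Dict.mk e2).get? "hash"
    if h1 == none && h2 == none then pvCat (pvCat "\t\t" rel) " [no-hash]"
    else if h1 != h2 then pvCat (pvCat "\t\t" rel) " [differs]"
    else pvCat "\t\t" rel

-- Source B's while loop: two-pointer merge over the two sorted key lists, emitting lines in order
def pvMergeLines (m1 m2 : PySem.Dict String (List (String × String))) (s1 s2 s3 : Bool) : List String → List String → List String
  | a :: t1, b :: t2 =>
      if a < b then (if !s1 then [a] else []) ++ pvMergeLines m1 m2 s1 s2 s3 t1 (b :: t2)
      else if b < a then (if !s2 then [pvCat "\t" b] else []) ++ pvMergeLines m1 m2 s1 s2 s3 (a :: t1) t2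
      else (if !s3 then [pvCommonLine ((m1.get? a).getD []) ((m2.get? a).getD []) a] else [])
           ++ pvMergeLines m1 m2 s1 s2 s3 t1 t2
  | a :: t1, [] => (if !s1 then [a] else []) ++ pvMergeLines m1 m2 s1 s2 s3 t1 []
  | [], b :: t2 => (if !s2 then [pvCat "\t" b] else []) ++ pvMergeLines m1 m2 s1 s2 s3 [] t2
  | [], [] => []
termination_by l1 l2 => l1.length + l2.length

def compare_filenames_py_alt (entries1 : List (List (String × String))) (entries2 : List (List (String × String))) (path1 : String) (path2 : String) (suppress_1 : Bool) (suppress_2 : Bool) (suppress_3 : Bool) : List String :=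
  let map1 := pvBuildRelMap entries1 path1
  let map2 := pvBuildRelMap entries2 path2
  let keys1 := PySem.List.sorted map1.keys (fun x => x) false
  let keys2 := PySem.List.sorted map2.keys (fun x => x) false
  pvMergeLines map1 map2 suppress_1 suppress_2 suppress_3 keys1 keys2

-- ===== PRECONDITION & SPEC =====
def Spec_compare_filenames_py (entries1 : List (List (String × String))) (entries2 : List (List (String × String))) (path1 : String) (path2 : String) (suppress_1 : Bool) (suppress_2 : Bool) (suppress_3 : Bool) (out : List String) : Prop := out = compare_filenames_py_alt entries1 entries2 path1 path2 suppress_1 suppress_2 suppress_3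
instance (entries1 : List (List (String × String))) (entries2 : List (List (String × String))) (path1 : String) (path2 : String) (suppress_1 : Bool) (suppress_2 : Bool) (suppress_3 : Bool) (out : List String) : Decidable (Spec_compare_filenames_py entries1 entries2 path1 path2 suppress_1 suppress_2 suppress_3 out) := by unfold Spec_compare_filenames_py; infer_instance

-- ===== CLAIM (what is proved, stated in full; the proofs are below) =====
def Claim_equal_compare_filenames_py : Prop := ∀ (entries1 : List (List (String × String))) (entries2 : List (List (String × String))) (path1 : String) (path2 : String) (suppress_1 : Bool) (suppress_2 : Bool) (suppress_3 : Bool), Dom_compare_filenames_py entries1 entries2 path1 path2 suppress_1 suppress_2 suppress_3 → Spec_compare_filenames_py entries1 entries2 path1 path2 suppress_1 suppress_2 suppress_3 (compare_filenames_py entries1 entries2 path1 path2 suppress_1 suppress_2 suppress_3)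

-- ===== LEMMAS AND PROOFS =====

-- the per-key line of A's loop, as an optional value
def pvLineFor (m1 m2 : PySem.Dict String (List (String × String))) (s1 s2 s3 : Bool) (rel : String) : Option String :=
  if m1.contains rel && !m2.contains rel then (if !s1 then some rel else none)
  else if m2.contains rel && !m1.contains rel then (if !s2 then some (pvCat "\t" rel) else none)
  else if !s3 then some (pvCommonLine ((m1.get? rel).getD []) ((m2.get? rel).getD []) rel) else none

lemma pv_foldl_opt {α β : Type} (f : α → Option β) (xs : List α) (acc : List β) :
    xs.foldl (fun a x => a ++ (f x).toList) acc = acc ++ xs.filterMap f := by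
  induction xs generalizing acc with
  | nil => simp
  | cons x xs ih =>
    cases h : f x <;> simp [List.foldl, h, ih]

-- A's foldl body appends exactly the optional line
lemma pvA_eq_filterMap (m1 m2 : PySem.Dict String (List (String × String))) (s1 s2 s3 : Bool) (ks : List String) :
    ks.foldl (fun lines rel =>
      let in1 := m1.contains rel
      let in2 := m2.contains rel
      if in1 && !in2 then
        if !s1 then lines ++ [rel] else lines
      else if in2 && !in1 then
        if !s2 then lines ++ [pvCat "\t" rel] else lines
      else
        if !s3 then
          let e1 := (m1.get? rel).getD []
          if (PySem.Dict.mk e1).get? "entry_type" == some "dir" then lines ++ [pvCat "\t\t" rel]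
          else
            let e2 := (m2.get? rel).getD []
            let h1 := (PySem.Dict.mk e1).get? "hash"
            let h2 := (PySem.Dict.mk e2).get? "hash"
            if h1 == none && h2 == none then lines ++ [pvCat (pvCat "\t\t" rel) " [no-hash]"]
            else if h1 != h2 then lines ++ [pvCat (pvCat "\t\t" rel) " [differs]"]
            else lines ++ [pvCat "\t\t" rel]
        else lines) [] = ks.filterMap (pvLineFor m1 m2 s1 s2 s3) := by
  have hstep : ∀ (lines : List String) (rel : String),
      (let in1 := m1.contains rel
       let in2 := m2.contains rel
       if in1 && !in2 then
         if !s1 then lines ++ [rel] else lines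
       else if in2 && !in1 then
         if !s2 then lines ++ [pvCat "\t" rel] else lines
       else
         if !s3 then
           let e1 := (m1.get? rel).getD []
           if (PySem.Dict.mk e1).get? "entry_type" == some "dir" then lines ++ [pvCat "\t\t" rel]
           else
             let e2 := (m2.get? rel).getD []
             let h1 := (PySem.Dict.mk e1).get? "hash"
             let h2 := (PySem.Dict.mk e2).get? "hash"
             if h1 == none && h2 == none then lines ++ [pvCat (pvCat "\t\t" rel) " [no-hash]"]
             else if h1 != h2 then lines ++ [pvCat (pvCat "\t\t" rel) " [differs]"]
             else lines ++ [pvCat "\t\t" rel]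
         else lines) = lines ++ (pvLineFor m1 m2 s1 s2 s3 rel).toList := by
    intro lines rel
    simp only [pvLineFor, pvCommonLine]
    split_ifs <;> simp_all
  rw [show (fun (lines : List String) (rel : String) =>
      let in1 := m1.contains rel
      let in2 := m2.contains rel
      if in1 && !in2 then
        if !s1 then lines ++ [rel] else lines
      else if in2 && !in1 then
        if !s2 then lines ++ [pvCat "\t" rel] else lines
      else
        if !s3 then
          let e1 := (m1.get? rel).getD []
          if (PySem.Dict.mk e1).get? "entry_type" == some "dir" then lines ++ [pvCat "\t\t" rel]
          else
            let e2 := (m2.get? rel).getD []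
            let h1 := (PySem.Dict.mk e1).get? "hash"
            let h2 := (PySem.Dict.mk e2).get? "hash"
            if h1 == none && h2 == none then lines ++ [pvCat (pvCat "\t\t" rel) " [no-hash]"]
            else if h1 != h2 then lines ++ [pvCat (pvCat "\t\t" rel) " [differs]"]
            else lines ++ [pvCat "\t\t" rel]
        else lines) = (fun a x => a ++ (pvLineFor m1 m2 s1 s2 s3 x).toList) from
      funext fun a => funext fun x => hstep a x]
  rw [pv_foldl_opt]; simp

-- keys of the rel-map are unique
lemma pv_nodup_keys (entries : List (List (String × String))) (bp : String) :
    (pvBuildRelMap entries bp).keys.Nodup := by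
  unfold pvBuildRelMap
  have : ∀ (d : PySem.Dict String (List (String × String))), d.keys.Nodup →
      (entries.foldl (fun result entry =>
        let entry_type := (PySem.Dict.mk entry).getD "entry_type" "file"
        let full_path := ((PySem.Dict.mk entry).get? "path").getD ""
        if entry_type == "dir" && full_path == "" then
          let seg := (PySem.Dict.mk entry).getD "segment" ""
          if seg != "" then result.insert (pvCat seg "/") entry else result
        else
          let fp := pvRstripSlash full_path
          if fp == "" then result
          else if PySem.Str.startswith (PySem.Str.lower fp) (pvCat (PySem.Str.lower (pvRstripSlash bp)) "/") then
            result.insert (String.ofList (fp.toList.drop ((pvRstripSlash bp).toList.length + 1))) entry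
          else if PySem.Str.lower fp == PySem.Str.lower (pvRstripSlash bp) then result
          else result.insert fp entry) d).keys.Nodup := by
    induction entries with
    | nil => intro d hd; simpa using hd
    | cons e es ih =>
      intro d hd
      simp only [List.foldl_cons]
      apply ih
      split_ifs <;> first | exact hd | exact PySem.Dict.nodup_keys_insert _ _ _ hd
  exact this PySem.Dict.empty (by simp)

-- the union of the two key streams in merge order, for the correctness proof
def pvMergeU : List String → List String → List String
  | a :: t1, b :: t2 =>
      if a < b then a :: pvMergeU t1 (b :: t2)
      else if b < a then b :: pvMergeU (a :: t1) t2
      else a :: pvMergeU t1 t2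
  | a :: t1, [] => a :: pvMergeU t1 []
  | [], l2 => l2
termination_by l1 l2 => l1.length + l2.length

lemma pv_mem_mergeU (l1 l2 : List String) (x : String) :
    x ∈ pvMergeU l1 l2 ↔ x ∈ l1 ∨ x ∈ l2 := by
  fun_induction pvMergeU l1 l2 with
  | case1 a t1 b t2 hab ih => simp [ih]; tauto
  | case2 a t1 b t2 hab hba ih => simp [ih]; tauto
  | case3 a t1 b t2 hab hba ih =>
    have heq : a = b := le_antisymm (not_lt.mp hba) (not_lt.mp hab)
    subst heq
    simp [ih]; tauto
  | case4 a t1 ih => simp [ih]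
  | case5 l2 => simp

lemma pv_pairwise_mergeU (l1 l2 : List String)
    (h1 : l1.Pairwise (· < ·)) (h2 : l2.Pairwise (· < ·)) :
    (pvMergeU l1 l2).Pairwise (· < ·) := by
  fun_induction pvMergeU l1 l2 with
  | case1 a t1 b t2 hab ih =>
    refine List.Pairwise.cons ?_ (ih h1.of_cons h2)
    intro y hy
    rcases (pv_mem_mergeU _ _ _).mp hy with hy1 | hy2
    · exact List.rel_of_pairwise_cons h1 hy1
    · rcases List.mem_cons.mp hy2 with rfl | hy2
      · exact hab
      · exact hab.trans (List.rel_of_pairwise_cons h2 hy2)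
  | case2 a t1 b t2 hab hba ih =>
    refine List.Pairwise.cons ?_ (ih h1 h2.of_cons)
    intro y hy
    rcases (pv_mem_mergeU _ _ _).mp hy with hy1 | hy2
    · rcases List.mem_cons.mp hy1 with rfl | hy1
      · exact hba
      · exact hba.trans (List.rel_of_pairwise_cons h1 hy1)
    · exact List.rel_of_pairwise_cons h2 hy2
  | case3 a t1 b t2 hab hba ih =>
    have heq : a = b := le_antisymm (not_lt.mp hba) (not_lt.mp hab)
    subst heq
    refine List.Pairwise.cons ?_ (ih h1.of_cons h2.of_cons)
    intro y hy
    rcases (pv_mem_mergeU _ _ _).mp hy with hy1 | hy2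
    · exact List.rel_of_pairwise_cons h1 hy1
    · exact List.rel_of_pairwise_cons h2 hy2
  | case4 a t1 ih =>
    refine List.Pairwise.cons ?_ (ih h1.of_cons List.Pairwise.nil)
    intro y hy
    rcases (pv_mem_mergeU _ _ _).mp hy with hy1 | hy2
    · exact List.rel_of_pairwise_cons h1 hy1
    · simp at hy2
  | case5 l2 => exact h2

-- the right-exhaustion phase of the merge
lemma pv_merge_nil (m1 m2 : PySem.Dict String (List (String × String))) (s1 s2 s3 : Bool)
    (l2 : List String)
    (hc2 : ∀ b ∈ l2, m2.contains b = true)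
    (hn1 : ∀ b ∈ l2, m1.contains b = false) :
    pvMergeLines m1 m2 s1 s2 s3 [] l2 = l2.filterMap (pvLineFor m1 m2 s1 s2 s3) := by
  induction l2 with
  | nil => simp [pvMergeLines]
  | cons b t2 ih =>
    simp only [pvMergeLines]
    rw [ih (fun y hy => hc2 y (List.mem_cons_of_mem _ hy))
        (fun y hy => hn1 y (List.mem_cons_of_mem _ hy))]
    have h2 := hc2 b List.mem_cons_self
    have h1 := hn1 b List.mem_cons_self
    cases s2 <;> simp [pvLineFor, h1, h2, List.filterMap_cons]

-- the merge emits exactly A's per-key optional line at each union key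
lemma pv_merge_eq_filterMap (m1 m2 : PySem.Dict String (List (String × String))) (s1 s2 s3 : Bool)
    (l1 l2 : List String)
    (hc1 : ∀ a ∈ l1, m1.contains a = true)
    (hc2 : ∀ b ∈ l2, m2.contains b = true)
    (hx1 : ∀ a ∈ l1, m2.contains a = true → a ∈ l2)
    (hx2 : ∀ b ∈ l2, m1.contains b = true → b ∈ l1)
    (h1 : l1.Pairwise (· < ·)) (h2 : l2.Pairwise (· < ·)) :
    pvMergeLines m1 m2 s1 s2 s3 l1 l2 = (pvMergeU l1 l2).filterMap (pvLineFor m1 m2 s1 s2 s3) := by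
  fun_induction pvMergeU l1 l2 with
  | case1 a t1 b t2 hab ih =>
    have hin1 : m1.contains a = true := hc1 a List.mem_cons_self
    have hin2 : m2.contains a = false := by
      by_contra h
      have hc : m2.contains a = true := by revert h; cases m2.contains a <;> simp
      rcases List.mem_cons.mp (hx1 a List.mem_cons_self hc) with rfl | hmem
      · exact absurd hab (lt_irrefl a)
      · exact absurd hab (asymm (List.rel_of_pairwise_cons h2 hmem))
    simp only [pvMergeLines, if_pos hab]
    rw [ih (fun x hx => hc1 x (List.mem_cons_of_mem _ hx)) hc2
        (fun x hx hm => hx1 x (List.mem_cons_of_mem _ hx) hm)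
        (fun y hy hm => by
          rcases List.mem_cons.mp (hx2 y hy hm) with rfl | hmem
          · exfalso
            rcases List.mem_cons.mp hy with rfl | hy2
            · exact absurd hab (lt_irrefl y)
            · exact absurd hab (asymm (List.rel_of_pairwise_cons h2 hy2))
          · exact hmem)
        h1.of_cons h2]
    cases s1 <;> simp [pvLineFor, hin1, hin2, List.filterMap_cons]
  | case2 a t1 b t2 hab hba ih =>
    have hin2 : m2.contains b = true := hc2 b List.mem_cons_self
    have hin1 : m1.contains b = false := by
      by_contra h
      have hc : m1.contains b = true := by revert h; cases m1.contains b <;> simp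
      rcases List.mem_cons.mp (hx2 b List.mem_cons_self hc) with rfl | hmem
      · exact absurd hba (lt_irrefl b)
      · exact absurd hba (asymm (List.rel_of_pairwise_cons h1 hmem))
    simp only [pvMergeLines, if_neg hab, if_pos hba]
    rw [ih hc1 (fun y hy => hc2 y (List.mem_cons_of_mem _ hy))
        (fun x hx hm => by
          rcases List.mem_cons.mp (hx1 x hx hm) with rfl | hmem
          · exfalso
            rcases List.mem_cons.mp hx with rfl | hx2
            · exact absurd hba (lt_irrefl x)
            · exact absurd hba (asymm (List.rel_of_pairwise_cons h1 hx2))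
          · exact hmem)
        (fun y hy hm => hx2 y (List.mem_cons_of_mem _ hy) hm)
        h1 h2.of_cons]
    cases s2 <;> simp [pvLineFor, hin1, hin2, List.filterMap_cons]
  | case3 a t1 b t2 hab hba ih =>
    have heq : a = b := le_antisymm (not_lt.mp hba) (not_lt.mp hab)
    subst heq
    have hin1 : m1.contains a = true := hc1 a List.mem_cons_self
    have hin2 : m2.contains a = true := hc2 a List.mem_cons_self
    simp only [pvMergeLines, if_neg hab, if_neg hba]
    rw [ih (fun x hx => hc1 x (List.mem_cons_of_mem _ hx))
        (fun y hy => hc2 y (List.mem_cons_of_mem _ hy))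
        (fun x hx hm => by
          rcases List.mem_cons.mp (hx1 x (List.mem_cons_of_mem _ hx) hm) with rfl | hmem
          · exact absurd (List.rel_of_pairwise_cons h1 hx) (lt_irrefl x)
          · exact hmem)
        (fun y hy hm => by
          rcases List.mem_cons.mp (hx2 y (List.mem_cons_of_mem _ hy) hm) with rfl | hmem
          · exact absurd (List.rel_of_pairwise_cons h2 hy) (lt_irrefl y)
          · exact hmem)
        h1.of_cons h2.of_cons]
    cases s3 <;> simp [pvLineFor, hin1, hin2, List.filterMap_cons]
  | case4 a t1 ih =>
    have hin1 : m1.contains a = true := hc1 a List.mem_cons_self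
    have hin2 : m2.contains a = false := by
      by_contra h
      have hc : m2.contains a = true := by revert h; cases m2.contains a <;> simp
      exact absurd (hx1 a List.mem_cons_self hc) (by simp)
    simp only [pvMergeLines]
    rw [ih (fun x hx => hc1 x (List.mem_cons_of_mem _ hx)) hc2
        (fun x hx hm => hx1 x (List.mem_cons_of_mem _ hx) hm)
        (fun y hy hm => absurd hy (by simp))
        h1.of_cons h2]
    cases s1 <;> simp [pvLineFor, hin1, hin2, List.filterMap_cons]
  | case5 l2 =>
    rw [pv_merge_nil m1 m2 s1 s2 s3 l2 hc2 (fun b hb => by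
      by_contra h
      have hc : m1.contains b = true := by revert h; cases m1.contains b <;> simp
      exact absurd (hx2 b hb hc) (by simp))]

theorem compare_filenames_py_spec : Claim_equal_compare_filenames_py := by
  intro entries1 entries2 path1 path2 s1 s2 s3 _
  unfold Spec_compare_filenames_py
  simp only [compare_filenames_py, compare_filenames_py_alt]
  rw [pvA_eq_filterMap]
  set m1 := pvBuildRelMap entries1 path1 with hm1
  set m2 := pvBuildRelMap entries2 path2 with hm2
  have hnd1 : m1.keys.Nodup := pv_nodup_keys entries1 path1
  have hnd2 : m2.keys.Nodup := pv_nodup_keys entries2 path2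
  set k1 := PySem.List.sorted m1.keys (fun x => x) false with hk1
  set k2 := PySem.List.sorted m2.keys (fun x => x) false with hk2
  have hp1 : k1.Pairwise (· < ·) := by
    rw [hk1, show m1.keys = PySem.Set.ofList m1.keys from (PySem.Set.ofList_eq_self_of_nodup _ hnd1).symm]
    exact PySem.List.sorted_ofList_pairwise_lt _
  have hp2 : k2.Pairwise (· < ·) := by
    rw [hk2, show m2.keys = PySem.Set.ofList m2.keys from (PySem.Set.ofList_eq_self_of_nodup _ hnd2).symm]
    exact PySem.List.sorted_ofList_pairwise_lt _
  set U : PySem.Set String := PySem.Set.union (PySem.Set.ofList m1.keys) m2.keys with hU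
  have hUnd : U.Nodup := PySem.Set.nodup_union _ _ (PySem.Set.nodup_ofList _)
  have hMnd : (pvMergeU k1 k2).Nodup :=
    List.nodup_iff_pairwise_ne.mpr ((pv_pairwise_mergeU k1 k2 hp1 hp2).imp ne_of_lt)
  have hperm : (pvMergeU k1 k2).Perm U := by
    refine (List.perm_ext_iff_of_nodup hMnd hUnd).mpr (fun x => ?_)
    rw [pv_mem_mergeU, hU, PySem.Set.mem_union, PySem.Set.mem_ofList,
        hk1, hk2, PySem.List.mem_sorted, PySem.List.mem_sorted]
  have hsortU : PySem.List.sorted U (fun x => x) false = pvMergeU k1 k2 :=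
    PySem.List.sorted_eq_of_perm_of_pairwise_lt _ _ _ hperm (pv_pairwise_mergeU k1 k2 hp1 hp2)
  rw [hsortU]
  rw [pv_merge_eq_filterMap m1 m2 s1 s2 s3 k1 k2
      (fun a ha => by
        rw [PySem.Dict.contains_eq_decide_mem_keys]
        simpa using ((PySem.List.mem_sorted _ _ _ _).mp (hk1 ▸ ha)))
      (fun b hb => by
        rw [PySem.Dict.contains_eq_decide_mem_keys]
        simpa using ((PySem.List.mem_sorted _ _ _ _).mp (hk2 ▸ hb)))
      (fun a ha hm => by
        rw [hk2, PySem.List.mem_sorted]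
        rw [PySem.Dict.contains_eq_decide_mem_keys] at hm
        simpa using hm)
      (fun b hb hm => by
        rw [hk1, PySem.List.mem_sorted]
        rw [PySem.Dict.contains_eq_decide_mem_keys] at hm
        simpa using hm)
      hp1 hp2]
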